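-- pv_equiv track=rewrite | github.com/alisonspencer/text_to_knit | text_to_knitting.py | consolidate_sequence_into_pattern
-- ===== SOURCE A (Python) =====
-- def consolidate_sequence_into_pattern(sequence: str):
--     consolidated = ''
--     current = sequence[0]
--     count = 1
--
--     for stitch in sequence[1:]:
--         if stitch == current:
--             count += 1
--         else:
--             consolidated += (current + str(count) + ' ')
--             current = stitch
--             count = 1
--
--     consolidated += (current + str(count) + ' ')
--
--     return consolidated
-- ===== SOURCE B (Python) =====
-- def consolidate_sequence_into_pattern(sequence: str):
--     pieces = []
--     n = len(sequence)
--     i = 0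
--     while i < n:
--         j = i + 1
--         while j < n and sequence[j] == sequence[i]:
--             j += 1
--         pieces.append(sequence[i] + str(j - i) + ' ')
--         i = j
--     return ''.join(pieces)
-- ===== Notes on version B (the rewrite author's own statement) =====
-- stated objective: alternative
-- what changed: Replaced A's character-by-character state machine (current stitch, running count, growing string) by an index-jumping two-pointer scan: the outer loop jumps from run start to run start, an inner loop advances j to the run's end, and one piece per run is collected in a list joined once at the end; Pre_ excludes only the empty string, where A raises IndexError at its initial subscript and B's scan loop never starts.
-- outside the precondition, e.g. on consolidate_sequence_into_pattern(''): A raises IndexError, B returns ''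
import Mathlib
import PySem

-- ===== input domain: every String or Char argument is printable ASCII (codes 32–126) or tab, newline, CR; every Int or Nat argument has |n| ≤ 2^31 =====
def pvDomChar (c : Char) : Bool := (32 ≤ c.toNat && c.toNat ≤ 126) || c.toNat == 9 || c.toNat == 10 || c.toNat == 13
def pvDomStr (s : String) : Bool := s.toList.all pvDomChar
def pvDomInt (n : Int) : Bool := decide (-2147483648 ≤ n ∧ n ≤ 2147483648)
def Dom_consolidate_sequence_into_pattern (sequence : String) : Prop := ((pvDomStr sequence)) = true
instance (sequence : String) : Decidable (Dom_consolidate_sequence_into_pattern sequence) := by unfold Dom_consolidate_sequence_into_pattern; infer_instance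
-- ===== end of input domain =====

-- B replaces A's current/count state machine by an index-jumping two-pointer scan
-- that collects one piece per run into a list and joins it once (alternative).


-- ===== PORT A =====
-- A's for-loop over sequence[1:] with state (consolidated, current, count)
def pvALoop (rest : List Char) (current : Char) (count : Int) (consolidated : String) : String :=
  match rest with
  | [] => consolidated ++ (String.mk [current] ++ PySem.Int.toStr count ++ " ")
  | stitch :: t =>
    if stitch == current then
      pvALoop t current (count + 1) consolidated
    else
      pvALoop t stitch 1 (consolidated ++ (String.mk [current] ++ PySem.Int.toStr count ++ " "))

def consolidate_sequence_into_pattern (sequence : String) : String :=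
  match sequence.toList with
  | [] => ""   -- Python raises IndexError at sequence[0]; excluded by Pre_
  | c :: rest => pvALoop rest c 1 ""

-- ===== PORT B =====
-- inner while loop: advance j past characters equal to sequence[i]; returns j - (i+1)
def pvRunLen (c : Char) : List Char → Nat
  | [] => 0
  | x :: t => if x == c then pvRunLen c t + 1 else 0

-- outer while loop: jump from run start to run start, collecting one piece per run
def pvBLoop : List Char → List String
  | [] => []
  | c :: t =>
    let r := pvRunLen c t
    (String.mk [c] ++ PySem.Int.toStr ((r : Int) + 1) ++ " ") :: pvBLoop (t.drop r)
termination_by l => l.length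
decreasing_by
  simp only [List.length_cons, List.length_drop]
  omega

def consolidate_sequence_into_pattern_alt (sequence : String) : String :=
  String.join (pvBLoop sequence.toList)

-- ===== PRECONDITION & SPEC =====
-- A evaluates sequence[0] first, so it raises IndexError on the empty string.
def Pre_consolidate_sequence_into_pattern (sequence : String) : Prop := sequence ≠ ""
instance (sequence : String) : Decidable (Pre_consolidate_sequence_into_pattern sequence) := by unfold Pre_consolidate_sequence_into_pattern; infer_instance
def pvWitness_consolidate_sequence_into_pattern : String := "kkp"

def Spec_consolidate_sequence_into_pattern (sequence : String) (out : String) : Prop := out = consolidate_sequence_into_pattern_alt sequence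
instance (sequence : String) (out : String) : Decidable (Spec_consolidate_sequence_into_pattern sequence out) := by unfold Spec_consolidate_sequence_into_pattern; infer_instance

-- ===== CLAIM (what is proved, stated in full; the proofs are below) =====
def Claim_equal_consolidate_sequence_into_pattern : Prop := ∀ (sequence : String), Dom_consolidate_sequence_into_pattern sequence → Pre_consolidate_sequence_into_pattern sequence → Spec_consolidate_sequence_into_pattern sequence (consolidate_sequence_into_pattern sequence)

-- ===== LEMMAS AND PROOFS =====

theorem pvJoinFold (a : String) (l : List String) :
    List.foldl (fun r s => r ++ s) a l = a ++ List.foldl (fun r s => r ++ s) "" l := by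
  induction l generalizing a with
  | nil => simp
  | cons x t ih =>
    simp only [List.foldl_cons]
    rw [ih (a ++ x), ih ("" ++ x)]
    simp [String.append_assoc]

theorem pvJoin_cons (a : String) (t : List String) :
    String.join (a :: t) = a ++ String.join t := by
  simp only [String.join, List.foldl_cons]
  rw [pvJoinFold]
  simp

theorem pvALoop_run (l : List Char) :
    ∀ (b : Char) (k : Int) (acc : String),
      pvALoop l b (k + 1) acc
        = acc ++ (String.mk [b] ++ PySem.Int.toStr (k + (pvRunLen b l : Int) + 1) ++ " ")
            ++ String.join (pvBLoop (l.drop (pvRunLen b l))) := by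
  induction l with
  | nil =>
    intro b k acc
    simp [pvALoop, pvRunLen, pvBLoop, String.join, String.append_assoc]
  | cons a t ih =>
    intro b k acc
    by_cases hab : a = b
    · subst hab
      simp only [pvALoop, beq_self_eq_true, if_true]
      have := ih a (k + 1) acc
      rw [this]
      have hr : pvRunLen a (a :: t) = pvRunLen a t + 1 := by simp [pvRunLen]
      rw [hr]
      have hd : (a :: t).drop (pvRunLen a t + 1) = t.drop (pvRunLen a t) := by
        simp [List.drop_succ_cons]
      rw [hd]
      have harg : k + 1 + ((pvRunLen a t : Nat) : Int) + 1
          = k + ((pvRunLen a t + 1 : Nat) : Int) + 1 := by push_cast; ring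
      rw [harg]
    · have hba : (a == b) = false := by simp [hab]
      simp only [pvALoop, hba, Bool.false_eq_true, if_false]
      have := ih a 0 (acc ++ (String.mk [b] ++ PySem.Int.toStr (k + 1) ++ " "))
      simp only [zero_add] at this
      rw [this]
      have hr : pvRunLen b (a :: t) = 0 := by simp [pvRunLen, hba]
      rw [hr]
      simp only [List.drop_zero]
      rw [show pvBLoop (a :: t)
            = (String.mk [a] ++ PySem.Int.toStr ((pvRunLen a t : Int) + 1) ++ " ")
                :: pvBLoop (t.drop (pvRunLen a t)) from by rw [pvBLoop]]
      rw [pvJoin_cons]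
      simp [String.append_assoc]

-- ===== VERDICT (by name: the statement is the Claim_ definition above) =====
theorem consolidate_sequence_into_pattern_spec : Claim_equal_consolidate_sequence_into_pattern := by
  intro s _ hpre
  unfold Spec_consolidate_sequence_into_pattern
  unfold consolidate_sequence_into_pattern consolidate_sequence_into_pattern_alt
  have hne : s.toList ≠ [] := fun h => hpre (String.toList_eq_nil_iff.mp h)
  rcases List.exists_cons_of_ne_nil hne with ⟨c, rest, hcr⟩
  rw [hcr]
  show pvALoop rest c 1 "" = String.join (pvBLoop (c :: rest))
  have := pvALoop_run rest c 0 ""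
  simp only [zero_add] at this
  rw [this]
  rw [show pvBLoop (c :: rest)
        = (String.mk [c] ++ PySem.Int.toStr ((pvRunLen c rest : Int) + 1) ++ " ")
            :: pvBLoop (rest.drop (pvRunLen c rest)) from by rw [pvBLoop]]
  rw [pvJoin_cons]
  simp [String.append_assoc]
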